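-- pv_equiv track=rewrite | github.com/Ibsham7/Third-Semester | Information security/lab#8/test.py | generate_caesar_shift_keys
-- ===== SOURCE A (Python) =====
-- HEX_ALPHABET = "0123456789abcdef"
--
-- def generate_caesar_shift_keys(base_key_hex: str):  # task 2
--
--     base = base_key_hex.lower() # shifting to lower
--     table = {c: i for i, c in enumerate(HEX_ALPHABET)} # dictionary for index and corresponding hex digit
--     out = [] # array that holds the 15 shifted keys
--
--     for shift in range(1, 16):
--         shifted_chars = []
--         for ch in base:
--             if ch in table: # validation
--                 shifted_chars.append(HEX_ALPHABET[(table[ch] + shift) % 16]) # mod 16 to ensure that range stays in hex range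
--             else:
--                 shifted_chars.append(ch)   # keep non-hex chars as-is
--         out.append(''.join(shifted_chars))  # appending tehe new shifted key
--     return out
-- ===== SOURCE B (Python) =====
-- def generate_caesar_shift_keys(base_key_hex: str):
--     def _step(ch):
--         if '0' <= ch <= '8' or 'a' <= ch <= 'e':
--             return chr(ord(ch) + 1)
--         if ch == '9':
--             return 'a'
--         if ch == 'f':
--             return '0'
--         return ch
--
--     out = []
--     current = base_key_hex.lower()
--     for _ in range(15):
--         current = ''.join(map(_step, current))
--         out.append(current)
--     return out
-- ===== Notes on version B (the rewrite author's own statement) =====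
-- stated objective: alternative
-- what changed: B replaces A's per-shift recomputation from the base string via an enumerate-built index dict with an incremental scheme: a table-free arithmetic single-step character shift (chr/ord range arithmetic) applied repeatedly, so key k is derived from key k-1 instead of from the base.
import Mathlib
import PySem

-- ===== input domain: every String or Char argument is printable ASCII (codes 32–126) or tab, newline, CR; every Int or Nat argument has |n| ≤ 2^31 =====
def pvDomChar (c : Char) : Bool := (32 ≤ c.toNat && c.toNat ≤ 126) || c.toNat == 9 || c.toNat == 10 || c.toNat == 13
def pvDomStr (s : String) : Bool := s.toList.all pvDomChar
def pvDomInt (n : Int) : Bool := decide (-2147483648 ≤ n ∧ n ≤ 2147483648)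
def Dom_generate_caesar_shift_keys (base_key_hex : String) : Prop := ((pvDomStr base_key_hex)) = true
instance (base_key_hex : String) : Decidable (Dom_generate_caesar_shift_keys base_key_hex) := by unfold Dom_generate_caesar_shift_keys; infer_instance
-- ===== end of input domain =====

-- B replaces A's per-shift recomputation from the base string (via an enumerate-built index dict)
-- with a table-free arithmetic single-step character shift applied incrementally, key k from key k-1
-- (objective: alternative decomposition, same cost).

-- ===== PORT A =====
-- module constant HEX_ALPHABET
def pvHEX_ALPHABET : String := "0123456789abcdef"

-- table = {c: i for i, c in enumerate(HEX_ALPHABET)} — input-independent, hoisted as a helper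
def pvTable : PySem.Dict Char Int :=
  (PySem.List.enumerate pvHEX_ALPHABET.toList 0).foldl
    (fun d p => d.insert p.2 p.1) PySem.Dict.empty

def generate_caesar_shift_keys (base_key_hex : String) : List String :=
  let base := PySem.Str.lower base_key_hex
  (PySem.List.pyRange 1 16 1).foldl (fun out shift =>
    let shifted_chars := base.toList.foldl (fun acc ch =>
      match pvTable.get? ch with
      | some i =>
        -- HEX_ALPHABET[(table[ch] + shift) % 16]; the index is reduced mod 16, IndexError unreachable
        match PySem.Str.pyGet? pvHEX_ALPHABET (PySem.Int.mod (i + shift) 16) with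
        | some d => acc ++ [d]
        | none => acc
      | none => acc ++ [ch]) []
    out ++ [String.ofList shifted_chars]) []

-- ===== PORT B =====
def pvStep (c : Char) : Char :=
  if ('0' ≤ c ∧ c ≤ '8') ∨ ('a' ≤ c ∧ c ≤ 'e') then Char.ofNat (c.toNat + 1)
  else if c = '9' then 'a'
  else if c = 'f' then '0'
  else c

def generate_caesar_shift_keys_alt (base_key_hex : String) : List String :=
  ((List.range 15).foldl
    (fun (st : String × List String) _ =>
      let cur := String.ofList (st.1.toList.map pvStep)
      (cur, st.2 ++ [cur]))
    (PySem.Str.lower base_key_hex, [])).2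

-- ===== PRECONDITION & SPEC =====
def Spec_generate_caesar_shift_keys (base_key_hex : String) (out : List String) : Prop := out = generate_caesar_shift_keys_alt base_key_hex
instance (base_key_hex : String) (out : List String) : Decidable (Spec_generate_caesar_shift_keys base_key_hex out) := by unfold Spec_generate_caesar_shift_keys; infer_instance

-- ===== CLAIM (what is proved, stated in full; the proofs are below) =====
def Claim_equal_generate_caesar_shift_keys : Prop := ∀ (base_key_hex : String), Dom_generate_caesar_shift_keys base_key_hex → Spec_generate_caesar_shift_keys base_key_hex (generate_caesar_shift_keys base_key_hex)

-- ===== LEMMAS AND PROOFS =====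

def pvHexL : List Char := ['0','1','2','3','4','5','6','7','8','9','a','b','c','d','e','f']

-- A's per-character result at a given shift, as a 0/1-element list
def pvAChar (shift : Int) (c : Char) : List Char :=
  match pvTable.get? c with
  | some i =>
    match PySem.Str.pyGet? pvHEX_ALPHABET (PySem.Int.mod (i + shift) 16) with
    | some d => [d]
    | none => []
  | none => [c]

-- B's one whole-string step
def pvStepStr (s : String) : String := String.ofList (s.toList.map pvStep)

-- per-character agreement on the 16 hex digits, by evaluation
set_option maxRecDepth 8000 in
theorem pv_core_hex : ∀ k ∈ List.range 15, ∀ c ∈ pvHexL,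
    pvAChar (1 + (k : Int)) c = [pvStep^[k+1] c] := by
  have h : ((List.range 15).all (fun k =>
      pvHexL.all (fun c => pvAChar (1 + (k : Int)) c == [pvStep^[k+1] c]))) = true := by decide
  simpa [List.all_eq_true] using h

theorem pv_mem_hex_of_range (c : Char)
    (h : ('0' ≤ c ∧ c ≤ '8') ∨ ('a' ≤ c ∧ c ≤ 'e')) : c ∈ pvHexL := by
  rcases h with ⟨h1, h2⟩ | ⟨h1, h2⟩
  · have hl : 48 ≤ c.toNat := by simpa [Char.le_def] using h1
    have hu : c.toNat ≤ 56 := by simpa [Char.le_def] using h2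
    interval_cases hv : c.toNat <;> (rw [← Char.ofNat_toNat c, hv]; decide)
  · have hl : 97 ≤ c.toNat := by simpa [Char.le_def] using h1
    have hu : c.toNat ≤ 101 := by simpa [Char.le_def] using h2
    interval_cases hv : c.toNat <;> (rw [← Char.ofNat_toNat c, hv]; decide)

theorem pv_step_fix (c : Char) (hc : c ∉ pvHexL) : pvStep c = c := by
  unfold pvStep
  split_ifs with h1 h2 h3
  · exact absurd (pv_mem_hex_of_range c h1) hc
  · exact absurd (by rw [h2]; decide) hc
  · exact absurd (by rw [h3]; decide) hc
  · rfl

theorem pv_table_none (c : Char) (hc : c ∉ pvHexL) : pvTable.get? c = none := by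
  simp [pvHexL] at hc
  push_neg at hc
  obtain ⟨h0,h1,h2,h3,h4,h5,h6,h7,h8,h9,ha,hb,hcc,hd,he,hf⟩ := hc
  simp [pvTable, pvHEX_ALPHABET, PySem.List.enumerate_cons, PySem.List.enumerate_nil,
    PySem.Dict.get?_insert, PySem.Dict.get?_empty,
    h0,h1,h2,h3,h4,h5,h6,h7,h8,h9,ha,hb,hcc,hd,he,hf]

theorem pv_perchar (k : Nat) (hk : k < 15) (c : Char) :
    pvAChar (1 + (k : Int)) c = [pvStep^[k+1] c] := by
  by_cases hc : c ∈ pvHexL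
  · exact pv_core_hex k (List.mem_range.mpr hk) c hc
  · unfold pvAChar
    rw [pv_table_none c hc, Function.iterate_fixed (pv_step_fix c hc)]

theorem pv_flatMap_singleton {α β : Type} (l : List α) (f : α → List β) (g : α → β)
    (h : ∀ c, f c = [g c]) : l.flatMap f = l.map g := by
  induction l with
  | nil => rfl
  | cons c t ih => simp [h, ih]

theorem pv_A_eq (s : String) :
    generate_caesar_shift_keys s
      = (PySem.List.pyRange 1 16 1).map
          (fun shift => String.ofList ((PySem.Str.lower s).toList.flatMap (pvAChar shift))) := by
  have hinner : ∀ (shift : Int) (l : List Char) (acc : List Char),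
      l.foldl (fun acc ch =>
        match pvTable.get? ch with
        | some i =>
          match PySem.Str.pyGet? pvHEX_ALPHABET (PySem.Int.mod (i + shift) 16) with
          | some d => acc ++ [d]
          | none => acc
        | none => acc ++ [ch]) acc
        = acc ++ l.flatMap (pvAChar shift) := by
    intro shift l
    induction l with
    | nil => intro acc; simp
    | cons c t ih =>
      intro acc
      simp only [List.foldl_cons, List.flatMap_cons]
      have hstep : (match pvTable.get? c with
        | some i =>
          match PySem.Str.pyGet? pvHEX_ALPHABET (PySem.Int.mod (i + shift) 16) with
          | some d => acc ++ [d]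
          | none => acc
        | none => acc ++ [c]) = acc ++ pvAChar shift c := by
        unfold pvAChar
        cases pvTable.get? c with
        | none => rfl
        | some i =>
          cases h2 : PySem.List.pyGet? pvHEX_ALPHABET.toList ((i + shift) % 16) <;> simp [h2]
      rw [hstep, ih, List.append_assoc]
  simp only [generate_caesar_shift_keys]
  rw [PySem.List.foldl_append_singleton_eq_map]
  simp only [List.nil_append]
  refine List.map_congr_left ?_
  intro shift _
  rw [hinner shift _ [], List.nil_append]

theorem pv_B_fold (n : Nat) (cur : String) (acc : List String) :
    (List.range n).foldl
      (fun (st : String × List String) _ =>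
        let c := String.ofList (st.1.toList.map pvStep)
        (c, st.2 ++ [c])) (cur, acc)
      = (pvStepStr^[n] cur, acc ++ (List.range n).map (fun j => pvStepStr^[j+1] cur)) := by
  induction n with
  | zero => simp
  | succ n ih =>
    rw [List.range_succ, List.foldl_append, ih]
    simp [pvStepStr, Function.iterate_succ_apply']

theorem pv_iter_ofList (n : Nat) (t : String) :
    pvStepStr^[n+1] t = String.ofList (t.toList.map (pvStep^[n+1])) := by
  induction n with
  | zero => simp [pvStepStr]
  | succ n ih =>
    rw [Function.iterate_succ_apply', ih]
    simp only [pvStepStr, String.toList_ofList, List.map_map]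
    congr 1
    apply List.map_congr_left
    intro c _
    exact (Function.iterate_succ_apply' pvStep (n+1) c).symm

-- ===== VERDICT (by name: the statement is the Claim_ definition above) =====
theorem generate_caesar_shift_keys_spec : Claim_equal_generate_caesar_shift_keys := by
  intro s _
  unfold Spec_generate_caesar_shift_keys
  rw [pv_A_eq]
  simp only [generate_caesar_shift_keys_alt]
  rw [pv_B_fold]
  simp only [List.nil_append]
  rw [PySem.List.pyRange_one, List.map_map]
  have h15 : ((16:Int) - 1).toNat = 15 := rfl
  rw [h15]
  refine List.map_congr_left ?_
  intro k hk
  simp only [Function.comp_apply]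
  rw [pv_iter_ofList k (PySem.Str.lower s)]
  congr 1
  exact pv_flatMap_singleton _ _ _ (pv_perchar k (List.mem_range.mp hk))
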